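-- pv_equiv track=rewrite | github.com/DReamLS/file_scanning | models/layout_analysis.py | filter_fences
-- ===== SOURCE A (Python) =====
-- def filter_fences(lines_dict, x_threshold=50, y_threshold=30):
--     """过滤行内和行间的无效间隔（围栏）"""
--     filtered_lines = {}
--     for y0, rects in lines_dict.items():
--         if len(rects) <= 1:
--             filtered_lines[y0] = rects
--             continue
--
--         grouped_rects = [[rects[0]]]
--         for i in range(1, len(rects)):
--             prev_rect = grouped_rects[-1][-1][1]
--             curr_rect = rects[i][1]
--             horizontal_gap = curr_rect[0] - prev_rect[2]
--             if horizontal_gap > x_threshold: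
--                 grouped_rects.append([rects[i]])
--             else:
--                 grouped_rects[-1].append(rects[i])
--
--         filtered_lines[y0] = [rect for group in grouped_rects for rect in group]
--
--     final_lines = {}
--     for y0, rects in filtered_lines.items():
--         if len(rects) >= 2:
--             final_lines[y0] = rects
--
--     return final_lines
-- ===== SOURCE B (Python) =====
-- def filter_fences(lines_dict, x_threshold=50, y_threshold=30):
--     """过滤行内和行间的无效间隔（围栏）"""
--     # The grouping in A flattens back to the original list; only the
--     # final >= 2 filter is observable.  One dict comprehension suffices.
--     return {y0: list(rects) for y0, rects in lines_dict.items() if len(rects) >= 2}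
-- ===== Notes on version B (the rewrite author's own statement) =====
-- stated objective: simpler
-- what changed: Replaced A's two-pass group-then-flatten pipeline (the grouping is a no-op once flattened) by a single dict comprehension that keeps entries with at least two rects and copies their lists.
import Mathlib
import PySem

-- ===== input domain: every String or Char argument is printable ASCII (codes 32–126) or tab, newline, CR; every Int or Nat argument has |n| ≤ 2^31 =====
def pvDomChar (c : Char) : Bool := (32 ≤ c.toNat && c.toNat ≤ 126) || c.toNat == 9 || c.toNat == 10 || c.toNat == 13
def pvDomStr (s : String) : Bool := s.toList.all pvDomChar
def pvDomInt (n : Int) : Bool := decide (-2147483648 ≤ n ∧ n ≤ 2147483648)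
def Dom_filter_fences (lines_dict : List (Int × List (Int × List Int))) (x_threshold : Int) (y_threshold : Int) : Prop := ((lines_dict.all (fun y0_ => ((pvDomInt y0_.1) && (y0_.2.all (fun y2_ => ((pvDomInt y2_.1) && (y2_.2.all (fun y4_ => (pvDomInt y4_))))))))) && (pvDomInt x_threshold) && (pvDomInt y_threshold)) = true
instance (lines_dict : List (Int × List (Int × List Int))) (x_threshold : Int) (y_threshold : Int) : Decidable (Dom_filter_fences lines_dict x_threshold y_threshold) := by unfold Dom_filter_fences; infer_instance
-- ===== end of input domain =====

-- B replaces A's dead group-then-flatten pipeline by a single filter pass; objective: simpler.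


-- ===== PORT A =====
-- body of 'for i in range(1, len(rects))': grouped_rects update
def pvGroupStep (x_threshold : Int) (rects : List (Int × List Int))
    (grouped_rects : List (List (Int × List Int))) (i : Int) : List (List (Int × List Int)) :=
  let prev_rect := ((grouped_rects.getLast?.getD []).getLast?.getD (0, [])).2
  let curr_rect := (PySem.List.pyGetD rects i (0, [])).2
  let horizontal_gap := PySem.List.pyGetD curr_rect 0 0 - PySem.List.pyGetD prev_rect 2 0
  if horizontal_gap > x_threshold then
    grouped_rects ++ [[PySem.List.pyGetD rects i (0, [])]]
  else
    grouped_rects.dropLast ++ [(grouped_rects.getLast?.getD []) ++ [PySem.List.pyGetD rects i (0, [])]]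

def filter_fences (lines_dict : List (Int × List (Int × List Int))) (x_threshold : Int) (y_threshold : Int) : List (Int × List (Int × List Int)) :=
  let filtered_lines : PySem.Dict Int (List (Int × List Int)) :=
    lines_dict.foldl (fun acc p =>
      if p.2.length ≤ 1 then acc.insert p.1 p.2
      else
        let grouped_rects :=
          (PySem.List.pyRange 1 (p.2.length : Int) 1).foldl (pvGroupStep x_threshold p.2)
            [[PySem.List.pyGetD p.2 0 (0, [])]]
        acc.insert p.1 grouped_rects.flatten) PySem.Dict.empty
  let final_lines : PySem.Dict Int (List (Int × List Int)) :=
    filtered_lines.items.foldl (fun acc p =>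
      if p.2.length ≥ 2 then acc.insert p.1 p.2 else acc) PySem.Dict.empty
  final_lines.items

-- ===== PORT B =====
def filter_fences_alt (lines_dict : List (Int × List (Int × List Int))) (x_threshold : Int) (y_threshold : Int) : List (Int × List (Int × List Int)) :=
  lines_dict.filter (fun p => p.2.length ≥ 2)

-- ===== PRECONDITION & SPEC =====
-- Keys must be pairwise distinct (an association list with duplicate keys does not represent a
-- Python dict; A's dict re-insertion collapses duplicates while B's list keeps them), and in every
-- entry with >= 2 rects each non-last rect list needs >= 3 elements and each non-first one >= 1,
-- exactly where A's rects[i-1][1][2] / rects[i][1][0] would raise IndexError.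
def Pre_filter_fences (lines_dict : List (Int × List (Int × List Int))) (x_threshold : Int) (y_threshold : Int) : Prop :=
  (lines_dict.map Prod.fst).Nodup ∧
  ∀ p ∈ lines_dict, 2 ≤ p.2.length →
    (∀ r ∈ p.2.dropLast, 3 ≤ r.2.length) ∧ (∀ r ∈ p.2.tail, 1 ≤ r.2.length)
instance (lines_dict : List (Int × List (Int × List Int))) (x_threshold : Int) (y_threshold : Int) : Decidable (Pre_filter_fences lines_dict x_threshold y_threshold) := by unfold Pre_filter_fences; infer_instance

def pvWitness_filter_fences : (List (Int × List (Int × List Int))) × Int × Int :=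
  ([(0, [(0, [1, 2, 3]), (1, [60, 70, 80])]), (7, [(2, [5, 6, 7])])], 50, 30)

def Spec_filter_fences (lines_dict : List (Int × List (Int × List Int))) (x_threshold : Int) (y_threshold : Int) (out : List (Int × List (Int × List Int))) : Prop := out = filter_fences_alt lines_dict x_threshold y_threshold
instance (lines_dict : List (Int × List (Int × List Int))) (x_threshold : Int) (y_threshold : Int) (out : List (Int × List (Int × List Int))) : Decidable (Spec_filter_fences lines_dict x_threshold y_threshold out) := by unfold Spec_filter_fences; infer_instance

-- ===== CLAIM (what is proved, stated in full; the proofs are below) =====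
def Claim_equal_filter_fences : Prop := ∀ (lines_dict : List (Int × List (Int × List Int))) (x_threshold : Int) (y_threshold : Int), Dom_filter_fences lines_dict x_threshold y_threshold → Pre_filter_fences lines_dict x_threshold y_threshold → Spec_filter_fences lines_dict x_threshold y_threshold (filter_fences lines_dict x_threshold y_threshold)

-- ===== LEMMAS AND PROOFS =====

-- Each grouping step appends rects[i] at the end of the last-or-new group: flatten grows by one.
lemma flatten_pvGroupStep (xt : Int) (rects : List (Int × List Int))
    (g : List (List (Int × List Int))) (hg : g ≠ []) (i : Int) :
    (pvGroupStep xt rects g i).flatten = g.flatten ++ [PySem.List.pyGetD rects i (0, [])] ∧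
    pvGroupStep xt rects g i ≠ [] := by
  rcases (List.eq_nil_or_concat g) with h | ⟨g', a, rfl⟩
  · exact absurd h hg
  · dsimp only [pvGroupStep]
    split <;> simp

lemma flatten_foldl_groupStep (xt : Int) (rects : List (Int × List Int))
    (l : List Int) (g : List (List (Int × List Int))) (hg : g ≠ []) :
    (l.foldl (pvGroupStep xt rects) g).flatten
      = g.flatten ++ l.map (fun i => PySem.List.pyGetD rects i (0, [])) := by
  induction l generalizing g with
  | nil => simp
  | cons i l ih =>
    obtain ⟨h1, h2⟩ := flatten_pvGroupStep xt rects g hg i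
    simp only [List.foldl_cons, List.map_cons]
    rw [ih _ h2, h1]
    simp

-- The grouping is a no-op once flattened: for nonempty rects, flatten of the grouped list = rects.
lemma flatten_grouped (xt : Int) (r0 : Int × List Int) (rest : List (Int × List Int)) :
    ((PySem.List.pyRange 1 ((r0 :: rest).length : Int) 1).foldl
        (pvGroupStep xt (r0 :: rest)) [[PySem.List.pyGetD (r0 :: rest) 0 (0, [])]]).flatten
      = r0 :: rest := by
  rw [flatten_foldl_groupStep _ _ _ _ (by simp)]
  have h := PySem.List.map_pyGetD_pyRange' (xs := r0 :: rest) (a := 1) (d := (0, [])) (by norm_num)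
  rw [h]
  simp [PySem.List.pyGetD, PySem.List.pyGet?, PySem.List.pyIdx?]

-- The second loop over fresh distinct keys is a filter.
lemma foldl_filter_insert (l : List (Int × List (Int × List Int)))
    (d : PySem.Dict Int (List (Int × List Int)))
    (hfresh : ∀ p ∈ l, d.contains p.1 = false)
    (hl : (l.map Prod.fst).Nodup) :
    (l.foldl (fun acc p => if p.2.length ≥ 2 then acc.insert p.1 p.2 else acc) d).items
      = d.items ++ l.filter (fun p => p.2.length ≥ 2) := by
  induction l generalizing d with
  | nil => simp
  | cons p l ih =>
    simp only [List.map_cons, List.nodup_cons, List.mem_map] at hl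
    simp only [List.foldl_cons, List.filter_cons]
    by_cases hp : p.2.length ≥ 2
    · simp only [if_pos hp, decide_eq_true hp]
      rw [ih (d.insert p.1 p.2)
          (fun q hq => by
            rw [PySem.Dict.contains_insert]
            have hne : q.1 ≠ p.1 := fun h => hl.1 ⟨q, hq, h⟩
            simp [hne, hfresh q (List.mem_cons_of_mem _ hq)])
          hl.2]
      rw [PySem.Dict.items_insert_of_not_contains _ _ (hfresh p List.mem_cons_self)]
      simp
    · simp only [if_neg hp]
      rw [ih d (fun q hq => hfresh q (List.mem_cons_of_mem _ hq)) hl.2]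
      simp [hp]

-- The first loop reproduces lines_dict itself (as items of a dict over fresh distinct keys).
lemma items_first_loop (lines_dict : List (Int × List (Int × List Int))) (xt : Int)
    (hnd : (lines_dict.map Prod.fst).Nodup) :
    (lines_dict.foldl (fun acc p =>
      if p.2.length ≤ 1 then acc.insert p.1 p.2
      else
        acc.insert p.1
          ((PySem.List.pyRange 1 (p.2.length : Int) 1).foldl (pvGroupStep xt p.2)
            [[PySem.List.pyGetD p.2 0 (0, [])]]).flatten)
      (PySem.Dict.empty : PySem.Dict Int (List (Int × List Int)))).items = lines_dict := by
  have hfun : (fun (acc : PySem.Dict Int (List (Int × List Int))) (p : Int × List (Int × List Int)) =>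
      if p.2.length ≤ 1 then acc.insert p.1 p.2
      else acc.insert p.1
          ((PySem.List.pyRange 1 (p.2.length : Int) 1).foldl (pvGroupStep xt p.2)
            [[PySem.List.pyGetD p.2 0 (0, [])]]).flatten)
      = fun acc p => acc.insert p.1
          (if p.2.length ≤ 1 then p.2
           else ((PySem.List.pyRange 1 (p.2.length : Int) 1).foldl (pvGroupStep xt p.2)
            [[PySem.List.pyGetD p.2 0 (0, [])]]).flatten) := by
    funext acc p; split <;> rfl
  rw [hfun,
    PySem.Dict.items_foldl_insert_fresh _ _ _ _ (by simp) (by simpa using hnd)]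
  simp only [show (PySem.Dict.empty : PySem.Dict Int (List (Int × List Int))).items = [] from rfl, List.nil_append]
  nth_rewrite 2 [show lines_dict = lines_dict.map id from (List.map_id _).symm]
  apply List.map_congr_left
  intro p hp
  by_cases h : p.2.length ≤ 1
  · simp [h]
  · rw [if_neg h]
    obtain ⟨r0, rest, hr⟩ : ∃ r0 rest, p.2 = r0 :: rest := by
      cases hz : p.2 with
      | nil => rw [hz] at h; simp at h
      | cons a b => exact ⟨a, b, rfl⟩
    rw [hr, flatten_grouped, ← hr]
    simp

-- ===== VERDICT (by name: the statement is the Claim_ definition above) =====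
theorem filter_fences_spec : Claim_equal_filter_fences := by
  intro lines_dict xt yt _ hpre
  unfold Spec_filter_fences
  obtain ⟨hnd, _⟩ := hpre
  simp only [filter_fences, filter_fences_alt]
  rw [items_first_loop lines_dict xt hnd,
    foldl_filter_insert lines_dict PySem.Dict.empty (by simp) hnd]
  simp [show (PySem.Dict.empty : PySem.Dict Int (List (Int × List Int))).items = [] from rfl]
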